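-- pv_equiv track=rewrite | github.com/sternberglab/George_et_al_2023 | ngs_offtarget_analysis/analysis_methods/sample_correlations.py | convert_reads_to_bins
-- ===== SOURCE A (Python) =====
-- def convert_reads_to_bins(reads, binsize):
-- 	# convert from {location: count, ...} to {bin: count, ...}
-- 	positions = sorted(reads.keys())
-- 	bins = {}
-- 	for position in positions:
-- 		bin_start = (position // binsize)*binsize
-- 		bin_end = bin_start + binsize
-- 		bin_key = f"{bin_start}_{bin_end}"
-- 		bins[bin_key] = bins.get(bin_key, 0) + reads[position]
-- 	return bins
-- ===== SOURCE B (Python) =====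
-- def convert_reads_to_bins(reads, binsize):
--     # convert from {location: count, ...} to {bin: count, ...}
--     # group-and-sum: scan the sorted items once, reducing each run of equal bins,
--     # so each bin key is formatted and written exactly once (no per-read dict accumulation)
--     items = sorted(reads.items(), key=lambda kv: kv[0])
--     bins = {}
--     i = 0
--     n = len(items)
--     while i < n:
--         b = items[i][0] // binsize
--         total = 0
--         while i < n and items[i][0] // binsize == b:
--             total += items[i][1]
--             i += 1
--         start = b * binsize
--         bins[f"{start}_{start + binsize}"] = total
--     return bins
-- ===== Notes on version B (the rewrite author's own statement) =====
-- stated objective: alternative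
-- what changed: Instead of accumulating a dict entry per read with dict.get, B scans the sorted items once with nested while loops, reducing each contiguous run of equal bins with an inner summing loop and writing each bin key exactly once.
import Mathlib
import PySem

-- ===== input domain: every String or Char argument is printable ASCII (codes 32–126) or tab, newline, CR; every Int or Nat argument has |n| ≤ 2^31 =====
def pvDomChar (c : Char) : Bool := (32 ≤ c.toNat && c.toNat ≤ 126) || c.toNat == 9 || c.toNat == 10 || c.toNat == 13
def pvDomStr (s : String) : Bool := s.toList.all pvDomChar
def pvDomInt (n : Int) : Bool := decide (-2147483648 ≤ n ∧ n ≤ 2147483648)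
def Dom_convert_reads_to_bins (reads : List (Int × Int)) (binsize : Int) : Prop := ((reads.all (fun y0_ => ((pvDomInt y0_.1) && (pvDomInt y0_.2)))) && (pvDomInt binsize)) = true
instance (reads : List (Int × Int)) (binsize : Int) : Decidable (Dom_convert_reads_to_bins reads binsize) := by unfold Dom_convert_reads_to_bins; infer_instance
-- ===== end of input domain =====

-- B scans the sorted items once and reduces each contiguous run of equal bins with an inner
-- summing loop, writing each bin key exactly once, instead of accumulating into a dict
-- entry per read with dict.get.

-- ===== PORT A =====
def convert_reads_to_bins (reads : List (Int × Int)) (binsize : Int) : List (String × Int) :=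
  let rd : PySem.Dict Int Int := PySem.Dict.mk reads
  let positions := PySem.List.sorted rd.keys (fun x => x) false
  (positions.foldl (fun (bins : PySem.Dict String Int) position =>
      let bin_start := (PySem.Int.floordiv position binsize) * binsize
      let bin_end := bin_start + binsize
      let bin_key := PySem.Int.toStr bin_start ++ "_" ++ PySem.Int.toStr bin_end
      bins.insert bin_key (bins.getD bin_key 0 + rd.getD position 0))
    PySem.Dict.empty).items

-- ===== PORT B =====
-- inner while loop: consume the run of items whose position is in bin q, summing counts
def pvTakeRun (b q : Int) (acc : Int) : List (Int × Int) → Int × List (Int × Int)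
  | [] => (acc, [])
  | x :: rest =>
    if PySem.Int.floordiv x.1 b = q then pvTakeRun b q (acc + x.2) rest
    else (acc, x :: rest)

theorem pvTakeRun_len (b q : Int) : ∀ (l : List (Int × Int)) (acc : Int),
    (pvTakeRun b q acc l).2.length ≤ l.length := by
  intro l
  induction l with
  | nil => intro acc; simp [pvTakeRun]
  | cons x rest ih =>
    intro acc
    simp only [pvTakeRun]
    split
    · exact le_trans (ih (acc + x.2)) (by simp)
    · simp

-- outer while loop: one iteration per bin run
def pvOuter (b : Int) (out : PySem.Dict String Int) : List (Int × Int) → PySem.Dict String Int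
  | [] => out
  | x :: rest =>
    let q := PySem.Int.floordiv x.1 b
    let res := pvTakeRun b q 0 (x :: rest)
    let start := q * b
    pvOuter b (out.insert (PySem.Int.toStr start ++ "_" ++ PySem.Int.toStr (start + b)) res.1) res.2
termination_by l => l.length
decreasing_by
  simp only [pvTakeRun, if_true]
  have h := pvTakeRun_len b (PySem.Int.floordiv x.1 b) rest (0 + x.2)
  simp only [List.length_cons]
  omega

def convert_reads_to_bins_alt (reads : List (Int × Int)) (binsize : Int) : List (String × Int) :=
  let items := PySem.List.sorted reads (fun kv => kv.1) false
  (pvOuter binsize PySem.Dict.empty items).items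

-- ===== PRECONDITION & SPEC =====
-- Pre_ requires distinct keys (reads encodes a Python dict, which cannot hold duplicate keys)
-- and excludes binsize = 0 with nonempty reads, where A raises ZeroDivisionError.
def Pre_convert_reads_to_bins (reads : List (Int × Int)) (binsize : Int) : Prop :=
  (reads.map Prod.fst).Nodup ∧ (binsize ≠ 0 ∨ reads = [])
instance (reads : List (Int × Int)) (binsize : Int) : Decidable (Pre_convert_reads_to_bins reads binsize) := by unfold Pre_convert_reads_to_bins; infer_instance
def pvWitness_convert_reads_to_bins : (List (Int × Int)) × Int := ([(-3, 2), (5, 1), (6, 4)], 4)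

def Spec_convert_reads_to_bins (reads : List (Int × Int)) (binsize : Int) (out : List (String × Int)) : Prop := out = convert_reads_to_bins_alt reads binsize
instance (reads : List (Int × Int)) (binsize : Int) (out : List (String × Int)) : Decidable (Spec_convert_reads_to_bins reads binsize out) := by unfold Spec_convert_reads_to_bins; infer_instance

-- ===== CLAIM (what is proved, stated in full; the proofs are below) =====
def Claim_equal_convert_reads_to_bins : Prop := ∀ (reads : List (Int × Int)) (binsize : Int), Dom_convert_reads_to_bins reads binsize → Pre_convert_reads_to_bins reads binsize → Spec_convert_reads_to_bins reads binsize (convert_reads_to_bins reads binsize)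

-- ===== LEMMAS AND PROOFS =====

-- ---------- string-side: injectivity of the bin key ----------

theorem pv_toDigitsCore_eq : ∀ (f n : Nat) (ds : List Char), n < f → 0 < n →
    Nat.toDigitsCore 10 f n ds = ((Nat.digits 10 n).map Nat.digitChar).reverse ++ ds := by
  intro f
  induction f with
  | zero => intro n ds h; omega
  | succ f ih =>
    intro n ds hlt hpos
    rw [Nat.digits_def' (by norm_num : (1:Nat) < 10) hpos]
    simp only [Nat.toDigitsCore]
    by_cases h0 : n / 10 = 0
    · simp [h0]
    · simp only [h0, if_false]
      rw [ih (n / 10) _ (by omega) (by omega)]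
      simp

theorem pv_toDigits_eq (n : Nat) :
    Nat.toDigits 10 n = if n = 0 then ['0'] else ((Nat.digits 10 n).map Nat.digitChar).reverse := by
  by_cases h : n = 0
  · subst h; rfl
  · rw [Nat.toDigits, pv_toDigitsCore_eq (n+1) n [] (by omega) (by omega)]
    simp [h]

theorem pv_digitChar_props {d : Nat} (h : d < 10) :
    Nat.digitChar d ≠ '-' ∧ Nat.digitChar d ≠ '_' := by
  interval_cases d <;> exact ⟨by decide, by decide⟩

theorem pv_digitChar_inj {d e : Nat} (hd : d < 10) (he : e < 10)
    (h : Nat.digitChar d = Nat.digitChar e) : d = e := by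
  interval_cases d <;> interval_cases e <;> simp_all <;> exact absurd h (by decide)

theorem pv_map_digitChar_inj : ∀ (l1 l2 : List Nat), (∀ x ∈ l1, x < 10) → (∀ x ∈ l2, x < 10) →
    l1.map Nat.digitChar = l2.map Nat.digitChar → l1 = l2 := by
  intro l1
  induction l1 with
  | nil => intro l2 _ _ h; cases l2 <;> simp_all
  | cons x l ih =>
    intro l2 h1 h2 h
    cases l2 with
    | nil => simp_all
    | cons y m =>
      simp only [List.map_cons, List.cons.injEq] at h
      have hx := pv_digitChar_inj (h1 x (by simp)) (h2 y (by simp)) h.1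
      subst hx
      rw [ih m (fun z hz => h1 z (by simp [hz])) (fun z hz => h2 z (by simp [hz])) h.2]

theorem pv_digits_map_inj {m n : Nat}
    (h : (Nat.digits 10 m).map Nat.digitChar = (Nat.digits 10 n).map Nat.digitChar) : m = n := by
  have hdm : ∀ x ∈ Nat.digits 10 m, x < 10 := fun x hx => Nat.digits_lt_base (by norm_num) hx
  have hdn : ∀ x ∈ Nat.digits 10 n, x < 10 := fun x hx => Nat.digits_lt_base (by norm_num) hx
  have heq := pv_map_digitChar_inj _ _ hdm hdn h
  calc m = Nat.ofDigits 10 (Nat.digits 10 m) := (Nat.ofDigits_digits 10 m).symm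
    _ = Nat.ofDigits 10 (Nat.digits 10 n) := by rw [heq]
    _ = n := Nat.ofDigits_digits 10 n

theorem pv_toDigits_inj {m n : Nat} (h : Nat.toDigits 10 m = Nat.toDigits 10 n) : m = n := by
  rw [pv_toDigits_eq, pv_toDigits_eq] at h
  by_cases hm : m = 0 <;> by_cases hn : n = 0
  · omega
  · exfalso
    rw [if_pos hm, if_neg hn] at h
    have h' := congrArg List.reverse h
    rw [List.reverse_reverse] at h'
    have : Nat.digits 10 n = [0] := by
      apply pv_map_digitChar_inj _ _ (fun x hx => Nat.digits_lt_base (by norm_num) hx) (by simp)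
      rw [← h']
      rfl
    have h0 := Nat.ofDigits_digits 10 n
    rw [this] at h0
    simp [Nat.ofDigits] at h0
    omega
  · exfalso
    rw [if_neg hm, if_pos hn] at h
    have h' := congrArg List.reverse h.symm
    rw [List.reverse_reverse] at h'
    have : Nat.digits 10 m = [0] := by
      apply pv_map_digitChar_inj _ _ (fun x hx => Nat.digits_lt_base (by norm_num) hx) (by simp)
      rw [← h']
      rfl
    have h0 := Nat.ofDigits_digits 10 m
    rw [this] at h0
    simp [Nat.ofDigits] at h0
    omega
  · rw [if_neg hm, if_neg hn] at h
    have h' := congrArg List.reverse h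
    rw [List.reverse_reverse, List.reverse_reverse] at h'
    exact pv_digits_map_inj h'

theorem pv_mem_toDigits {c : Char} {n : Nat} (h : c ∈ Nat.toDigits 10 n) : c ≠ '-' ∧ c ≠ '_' := by
  rw [pv_toDigits_eq] at h
  by_cases hn : n = 0
  · rw [if_pos hn] at h; simp at h; subst h; exact ⟨by decide, by decide⟩
  · rw [if_neg hn] at h
    rw [List.mem_reverse, List.mem_map] at h
    obtain ⟨d, hd, hc⟩ := h
    have := pv_digitChar_props (Nat.digits_lt_base (by norm_num) hd)
    subst hc; exact this

theorem pv_toChars_no_underscore {n : Int} : '_' ∉ PySem.Int.toChars n := by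
  intro h
  unfold PySem.Int.toChars at h
  split at h
  · rw [List.mem_cons] at h
    rcases h with h | h
    · exact absurd h (by decide)
    · exact (pv_mem_toDigits h).2 rfl
  · exact (pv_mem_toDigits h).2 rfl

theorem pv_toChars_inj {m n : Int} (h : PySem.Int.toChars m = PySem.Int.toChars n) : m = n := by
  unfold PySem.Int.toChars at h
  split at h <;> split at h
  · rename_i hm hn
    simp only [List.cons.injEq] at h
    have := pv_toDigits_inj h.2
    omega
  · rename_i hm hn
    exfalso
    have : '-' ∈ Nat.toDigits 10 n.toNat := by rw [← h]; simp
    exact (pv_mem_toDigits this).1 rfl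
  · rename_i hm hn
    exfalso
    have : '-' ∈ Nat.toDigits 10 m.toNat := by rw [h]; simp
    exact (pv_mem_toDigits this).1 rfl
  · rename_i hm hn
    have := pv_toDigits_inj h
    omega

theorem pv_split_underscore : ∀ (a : List Char) (b : List Char) (c : List Char) (d : List Char),
    '_' ∉ a → '_' ∉ c → a ++ '_' :: b = c ++ '_' :: d → a = c ∧ b = d := by
  intro a
  induction a with
  | nil =>
    intro b c d _ hc h
    cases c with
    | nil => simp_all
    | cons x cs =>
      exfalso
      simp only [List.nil_append, List.cons_append, List.cons.injEq] at h
      exact hc (h.1 ▸ List.mem_cons_self)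
  | cons x as ih =>
    intro b c d ha hc h
    cases c with
    | nil =>
      exfalso
      simp only [List.nil_append, List.cons_append, List.cons.injEq] at h
      exact ha (h.1.symm ▸ List.mem_cons_self)
    | cons y cs =>
      simp only [List.cons_append, List.cons.injEq] at h
      obtain ⟨hxy, h2⟩ := h
      have := ih b cs d (fun hm => ha (List.mem_cons_of_mem _ hm)) (fun hm => hc (List.mem_cons_of_mem _ hm)) h2
      exact ⟨by rw [hxy, this.1], this.2⟩

-- the string key s ↦ f"{s}_{s+binsize}" is injective
theorem pv_key_inj (b : Int) {s t : Int}
    (h : PySem.Int.toStr s ++ "_" ++ PySem.Int.toStr (s + b)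
       = PySem.Int.toStr t ++ "_" ++ PySem.Int.toStr (t + b)) : s = t := by
  have h' := congrArg String.toList h
  simp only [String.toList_append, PySem.Int.toList_toStr] at h'
  have : PySem.Int.toChars s ++ '_' :: PySem.Int.toChars (s + b)
       = PySem.Int.toChars t ++ '_' :: PySem.Int.toChars (t + b) := by
    simpa using h'
  exact pv_toChars_inj (pv_split_underscore _ _ _ _ pv_toChars_no_underscore pv_toChars_no_underscore this).1

-- ---------- abbreviations for the proofs ----------

def pvSt (b p : Int) : Int := PySem.Int.floordiv p b * b
def pvKey (b s : Int) : String := PySem.Int.toStr s ++ "_" ++ PySem.Int.toStr (s + b)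
def pvStep (b : Int) (bins : PySem.Dict String Int) (x : Int × Int) : PySem.Dict String Int :=
  bins.insert (pvKey b (pvSt b x.1)) (bins.getD (pvKey b (pvSt b x.1)) 0 + x.2)

theorem pv_pvKey_inj (b : Int) : Function.Injective (pvKey b) := fun _ _ h => pv_key_inj b h

theorem pv_binStart_mono {b : Int} (hb : b ≠ 0) {p q : Int} (h : p ≤ q) :
    pvSt b p ≤ pvSt b q := by
  unfold pvSt
  rcases lt_or_gt_of_ne hb with hneg | hpos
  · have e1 : PySem.Int.floordiv p b = PySem.Int.floordiv (-p) (-b) := by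
      rw [PySem.Int.floordiv_neg_neg]
    have e2 : PySem.Int.floordiv q b = PySem.Int.floordiv (-q) (-b) := by
      rw [PySem.Int.floordiv_neg_neg]
    rw [e1, e2, PySem.Int.floordiv_eq_ediv_of_pos (by omega), PySem.Int.floordiv_eq_ediv_of_pos (by omega)]
    have hdiv : (-q) / (-b) ≤ (-p) / (-b) := Int.ediv_le_ediv (by omega) (by omega)
    nlinarith [hdiv]
  · rw [PySem.Int.floordiv_eq_ediv_of_pos hpos, PySem.Int.floordiv_eq_ediv_of_pos hpos]
    have hdiv : p / b ≤ q / b := Int.ediv_le_ediv hpos h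
    nlinarith [hdiv]

-- ---------- pvTakeRun is takeWhile/dropWhile ----------

theorem pvTakeRun_eq (b q : Int) : ∀ (l : List (Int × Int)) (acc : Int),
    pvTakeRun b q acc l
      = (acc + ((l.takeWhile (fun x => decide (PySem.Int.floordiv x.1 b = q))).map (·.2)).sum,
         l.dropWhile (fun x => decide (PySem.Int.floordiv x.1 b = q))) := by
  intro l
  induction l with
  | nil => intro acc; simp [pvTakeRun]
  | cons x rest ih =>
    intro acc
    by_cases h : PySem.Int.floordiv x.1 b = q
    · simp [pvTakeRun, h, ih (acc + x.2), add_assoc]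
    · simp [pvTakeRun, h]

-- ---------- A's fold over a run of one bin collapses to one insert ----------

theorem pv_fold_run (b s : Int) : ∀ (r : List (Int × Int)) (d : PySem.Dict String Int) (acc : Int),
    (∀ x ∈ r, pvSt b x.1 = s) →
    r.foldl (pvStep b) (d.insert (pvKey b s) acc)
      = d.insert (pvKey b s) (acc + (r.map (·.2)).sum) := by
  intro r
  induction r with
  | nil => intro d acc _; simp
  | cons x r ih =>
    intro d acc h
    have hs : pvSt b x.1 = s := h x List.mem_cons_self
    simp only [List.foldl_cons, pvStep, hs]
    rw [PySem.Dict.getD_insert_self, PySem.Dict.insert_insert_self]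
    rw [ih d (acc + x.2) (fun y hy => h y (List.mem_cons_of_mem _ hy))]
    simp [add_assoc]

-- ---------- main: A's fold equals B's run-grouping scan ----------

theorem pv_fold_eq_outer (b : Int) (hb : b ≠ 0) : ∀ (n : Nat) (l : List (Int × Int)) (d : PySem.Dict String Int),
    l.length ≤ n →
    (l.map (fun x => pvSt b x.1)).Pairwise (· ≤ ·) →
    (∀ x ∈ l, d.contains (pvKey b (pvSt b x.1)) = false) →
    l.foldl (pvStep b) d = pvOuter b d l := by
  intro n
  induction n with
  | zero =>
    intro l d hlen _ _
    have hl : l = [] := List.eq_nil_of_length_eq_zero (by omega)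
    subst hl
    simp [pvOuter]
  | succ n ih =>
    intro l d hlen hpair hfresh
    cases l with
    | nil => simp [pvOuter]
    | cons x rest =>
      have hq : pvSt b x.1 = PySem.Int.floordiv x.1 b * b := rfl
      -- split rest into the run of bin q and the remainder
      have htr : pvTakeRun b (PySem.Int.floordiv x.1 b) 0 (x :: rest)
          = ((0 + x.2) + ((rest.takeWhile (fun y => decide (PySem.Int.floordiv y.1 b = PySem.Int.floordiv x.1 b))).map (·.2)).sum,
             rest.dropWhile (fun y => decide (PySem.Int.floordiv y.1 b = PySem.Int.floordiv x.1 b))) := by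
        have h1 : pvTakeRun b (PySem.Int.floordiv x.1 b) 0 (x :: rest)
            = pvTakeRun b (PySem.Int.floordiv x.1 b) (0 + x.2) rest := by
          simp [pvTakeRun]
        rw [h1, pvTakeRun_eq]
      have houter : pvOuter b d (x :: rest)
          = pvOuter b (d.insert (pvKey b (PySem.Int.floordiv x.1 b * b)) (pvTakeRun b (PySem.Int.floordiv x.1 b) 0 (x :: rest)).1)
              (pvTakeRun b (PySem.Int.floordiv x.1 b) 0 (x :: rest)).2 := by
        rw [pvOuter]
        rfl
      set P : Int × Int → Bool := fun y => decide (PySem.Int.floordiv y.1 b = PySem.Int.floordiv x.1 b) with hP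
      set r := rest.takeWhile P with hr
      set rest2 := rest.dropWhile P with hrest2
      have hrmem : ∀ y ∈ r, pvSt b y.1 = PySem.Int.floordiv x.1 b * b := by
        intro y hy
        have hpy := List.mem_takeWhile_imp hy
        rw [hP] at hpy
        have : PySem.Int.floordiv y.1 b = PySem.Int.floordiv x.1 b := by simpa using hpy
        simp [pvSt, this]
      have hrestsplit : rest = r ++ rest2 := (List.takeWhile_append_dropWhile).symm
      have hfreshx := hfresh x List.mem_cons_self
      -- A's fold over the head and the run collapses to one insert
      have hfold : (x :: rest).foldl (pvStep b) d
          = rest2.foldl (pvStep b) (d.insert (pvKey b (PySem.Int.floordiv x.1 b * b)) ((0 + x.2) + (r.map (·.2)).sum)) := by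
        rw [List.foldl_cons]
        have hstep : pvStep b d x = d.insert (pvKey b (PySem.Int.floordiv x.1 b * b)) (0 + x.2) := by
          unfold pvStep
          rw [hq] at hfreshx ⊢
          rw [PySem.Dict.getD_of_not_contains d 0 hfreshx]
        rw [hstep]
        conv_lhs => rw [hrestsplit]
        rw [List.foldl_append, pv_fold_run b (PySem.Int.floordiv x.1 b * b) r d (0 + x.2) hrmem]
      -- members of rest2 lie in strictly later bins
      have hpair' : ((x :: rest).map (fun y : Int × Int => pvSt b y.1)).Pairwise (· ≤ ·) := hpair
      rw [List.map_cons, List.pairwise_cons] at hpair'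
      obtain ⟨hxall, hrestpair⟩ := hpair'
      have hrest2sub : rest2.Sublist rest := by rw [hrest2]; exact List.dropWhile_sublist P
      have hSne : ∀ y ∈ rest2, pvSt b y.1 ≠ PySem.Int.floordiv x.1 b * b := by
        cases hc : rest2 with
        | nil => simp
        | cons z tail =>
          have hzP : P z = false := by
            have h2 : rest.dropWhile P ≠ [] := by rw [← hrest2, hc]; simp
            have hhd := List.head_dropWhile_not P h2
            have hx2 : (rest.dropWhile P).head h2 = z := by
              have : rest.dropWhile P = z :: tail := by rw [← hrest2, hc]
              simp [this]
            rwa [hx2] at hhd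
          have hzne : pvSt b z.1 ≠ PySem.Int.floordiv x.1 b * b := by
            intro he
            have : PySem.Int.floordiv z.1 b = PySem.Int.floordiv x.1 b :=
              mul_right_cancel₀ hb (by simpa [pvSt] using he)
            rw [hP] at hzP
            simp [this] at hzP
          have hxz : PySem.Int.floordiv x.1 b * b ≤ pvSt b z.1 := by
            have hzrest : z ∈ rest := hrest2sub.mem (hc ▸ List.mem_cons_self)
            have := hxall (pvSt b z.1) (List.mem_map.mpr ⟨z, hzrest, rfl⟩)
            rwa [hq] at this
          intro y hy
          rcases List.mem_cons.mp hy with hyz | hyt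
          · subst hyz; exact hzne
          · -- pvSt b z.1 ≤ pvSt b y.1 from pairwise on rest2
            have hp2 : (rest2.map (fun y : Int × Int => pvSt b y.1)).Pairwise (· ≤ ·) :=
              List.Pairwise.sublist (hrest2sub.map _) hrestpair
            rw [hc, List.map_cons, List.pairwise_cons] at hp2
            have hzy := hp2.1 (pvSt b y.1) (List.mem_map.mpr ⟨y, hyt, rfl⟩)
            intro he
            have : pvSt b z.1 ≤ PySem.Int.floordiv x.1 b * b := he ▸ hzy
            omega
      -- apply the induction hypothesis to the remainder
      rw [hfold, houter, htr]
      apply ih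
      · rw [hrest2]
        have := List.length_dropWhile_le P rest
        simp only [List.length_cons] at hlen
        omega
      · exact List.Pairwise.sublist (hrest2sub.map _) hrestpair
      · intro y hy
        rw [PySem.Dict.contains_insert]
        have h1 : (pvKey b (pvSt b y.1) == pvKey b (PySem.Int.floordiv x.1 b * b)) = false := by
          simp only [beq_eq_false_iff_ne, ne_eq]
          intro he
          exact hSne y hy (pv_pvKey_inj b he)
        have h2 : d.contains (pvKey b (pvSt b y.1)) = false :=
          hfresh y (List.mem_cons_of_mem _ (hrest2sub.mem hy))
        rw [h1, h2]
        rfl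

theorem pv_main (reads : List (Int × Int)) (b : Int)
    (hnd : (reads.map Prod.fst).Nodup) (hb : b ≠ 0) :
    convert_reads_to_bins reads b = convert_reads_to_bins_alt reads b := by
  set L := PySem.List.sorted reads (fun kv => kv.1) false with hL
  have hperm : L.Perm reads := PySem.List.sorted_perm reads (fun kv => kv.1) false
  have hndL : (L.map Prod.fst).Nodup := ((hperm.map Prod.fst).nodup_iff).mpr hnd
  have hpairfst : (L.map (fun kv : Int × Int => kv.1)).Pairwise (· ≤ ·) :=
    PySem.List.sorted_map_key_pairwise reads (fun kv => kv.1)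
  have hlt : (L.map Prod.fst).Pairwise (· < ·) :=
    (hpairfst.and hndL).imp (fun h => lt_of_le_of_ne h.1 h.2)
  have hposeq : PySem.List.sorted (reads.map Prod.fst) (fun x => x) false = L.map Prod.fst :=
    PySem.List.sorted_eq_of_perm_of_pairwise_lt _ _ _ (hperm.map Prod.fst) hlt
  have hrdnd : (PySem.Dict.mk reads).keys.Nodup := hnd
  -- A's fold over sorted positions is the fold of pvStep over the sorted items
  have hA : convert_reads_to_bins reads b = (L.foldl (pvStep b) PySem.Dict.empty).items := by
    show ((PySem.List.sorted (PySem.Dict.mk reads).keys (fun x => x) false).foldl _ PySem.Dict.empty).items = _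
    have hkeys : (PySem.Dict.mk reads).keys = reads.map Prod.fst := rfl
    rw [hkeys, hposeq, List.foldl_map]
    congr 1
    apply PySem.List.foldl_congr_mem
    intro bins x hx
    have hxr : x ∈ reads := (List.Perm.mem_iff hperm).mp hx
    have hitem : (x.1, x.2) ∈ (PySem.Dict.mk reads).items := by
      show (x.1, x.2) ∈ reads
      simpa using hxr
    have hget : (PySem.Dict.mk reads).getD x.1 0 = x.2 :=
      PySem.Dict.getD_of_mem_items _ hitem hrdnd 0
    show bins.insert _ (bins.getD _ 0 + (PySem.Dict.mk reads).getD x.1 0) = pvStep b bins x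
    rw [hget]
    rfl
  have hB : convert_reads_to_bins_alt reads b = (pvOuter b PySem.Dict.empty L).items := rfl
  rw [hA, hB]
  congr 1
  apply pv_fold_eq_outer b hb L.length L PySem.Dict.empty le_rfl
  · have hp : L.Pairwise (fun a c : Int × Int => a.1 ≤ c.1) := List.pairwise_map.mp hpairfst
    exact List.pairwise_map.mpr (hp.imp (fun h => pv_binStart_mono hb h))
  · intro x _
    exact PySem.Dict.contains_empty _

-- ===== VERDICT (by name: the statement is the Claim_ definition above) =====
theorem convert_reads_to_bins_spec : Claim_equal_convert_reads_to_bins := by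
  intro reads binsize _hdom hpre
  obtain ⟨hnd, hor⟩ := hpre
  unfold Spec_convert_reads_to_bins
  by_cases hre : reads = []
  · subst hre
    have h1 : PySem.List.sorted (α := Int) [] (fun x => x) false = [] := by
      rw [PySem.List.sorted_eq_nil_iff]
    have h2 : PySem.List.sorted (α := Int × Int) [] (fun kv => kv.1) false = [] := by
      rw [PySem.List.sorted_eq_nil_iff]
    simp [convert_reads_to_bins, convert_reads_to_bins_alt, pvOuter, h1, h2]
  · exact pv_main reads binsize hnd (hor.resolve_right hre)
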